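-- pv_equiv track=rewrite | github.com/JohnDoe6345789/automatic_linux_network_repair | src/automatic_linux_network_repair/systemd_panel.py | parse_systemd_dump
-- ===== SOURCE A (Python) =====
-- def parse_systemd_dump(dump: str) -> dict[str, str]:
--     """Return mapping of file paths to their raw contents from a dump string.
--
--     Recognizes both the ``# FILE: <path>`` markers used by generated dumps and
--     the ``# /path/to/unit`` headers that ``systemd-analyze cat-config`` emits
--     directly. Everything between one marker and the next is treated as the file
--     contents. Leading and trailing whitespace for each file body is stripped,
--     but the original line ordering is preserved.
--     """
--
--     files: dict[str, list[str]] = {}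
--     current_path: str | None = None
--     buffer: list[str] = []
--
--     def _extract_path(header_line: str) -> str | None:
--         if header_line.startswith("# FILE: "):
--             return header_line.split("# FILE: ", 1)[1].strip()
--
--         if header_line.startswith("#/"):
--             candidate = header_line[1:].strip()
--             if candidate.startswith("/"):
--                 return candidate
--
--         if header_line.startswith("# "):
--             candidate = header_line[2:].strip()
--             if candidate.startswith("/"):
--                 return candidate
--
--         return None
--
--     for line in dump.splitlines():
--         path = _extract_path(line)
--         if path:
--             if current_path is not None:
--                 files[current_path] = "\n".join(buffer).strip("\n")
--             current_path = path
--             buffer = []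
--             continue
--
--         if current_path is None:
--             continue
--
--         if not buffer and line.startswith("########################################"):
--             continue
--
--         buffer.append(line)
--
--     if current_path is not None:
--         files[current_path] = "\n".join(buffer).strip("\n")
--
--     return files
-- ===== SOURCE B (Python) =====
-- def parse_systemd_dump(dump: str) -> dict[str, str]:
--     """Two-pass variant: first group lines into (path, body) segments,
--     then assemble each segment's contents."""
--
--     def _extract_path(header_line: str) -> str | None:
--         if header_line.startswith("# FILE: "):
--             return header_line.split("# FILE: ", 1)[1].strip()
--
--         if header_line.startswith("#/"):
--             candidate = header_line[1:].strip()
--             if candidate.startswith("/"):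
--                 return candidate
--
--         if header_line.startswith("# "):
--             candidate = header_line[2:].strip()
--             if candidate.startswith("/"):
--                 return candidate
--
--         return None
--
--     # Pass 1: group lines into segments, discarding lines before the first header.
--     segments: list[tuple[str, list[str]]] = []
--     for line in dump.splitlines():
--         path = _extract_path(line)
--         if path:
--             segments.append((path, []))
--         elif segments:
--             segments[-1][1].append(line)
--
--     # Pass 2: assemble contents; duplicate paths overwrite via dict assignment.
--     files: dict[str, str] = {}
--     for path, body in segments:
--         i = 0
--         while i < len(body) and body[i].startswith("########################################"):
--             i += 1
--         files[path] = "\n".join(body[i:]).strip("\n")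
--     return files
-- ===== Notes on version B (the rewrite author's own statement) =====
-- stated objective: alternative
-- what changed: Replaces A's single-pass buffer-flush state machine (current_path/buffer with flush-on-header and at end) by two separate passes: pass 1 groups the lines into an ordered list of (path, body) segments, pass 2 assembles each body (skip leading separator lines, join, strip) and builds the dict.
import Mathlib
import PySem

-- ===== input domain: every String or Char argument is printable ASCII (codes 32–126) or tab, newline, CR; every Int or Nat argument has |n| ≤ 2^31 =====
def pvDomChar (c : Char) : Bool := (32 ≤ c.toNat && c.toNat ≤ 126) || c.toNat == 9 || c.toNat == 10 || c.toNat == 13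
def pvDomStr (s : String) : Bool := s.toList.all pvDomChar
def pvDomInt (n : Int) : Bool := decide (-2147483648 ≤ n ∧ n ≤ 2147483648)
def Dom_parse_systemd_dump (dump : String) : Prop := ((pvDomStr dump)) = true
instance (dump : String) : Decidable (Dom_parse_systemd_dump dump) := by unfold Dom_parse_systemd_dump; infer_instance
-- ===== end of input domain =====

-- B replaces A's interleaved buffer-flush state machine by two passes (group lines into
-- (path, body) segments, then assemble each body); objective: alternative decomposition, same cost.

-- ===== PORT A =====

-- the literal separator prefix "####…" (40 '#') from the source
def pvSep : String := "########################################"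

-- _extract_path, shared verbatim by both Pythons (nested helper, identical in A and B)
def pvExtractPath (l : String) : Option String :=
  if PySem.Str.startswith l "# FILE: " then
    -- header_line.split("# FILE: ", 1)[1].strip(); the [1] always exists (startswith holds)
    some (PySem.Str.strip ((PySem.List.pyGet? ((PySem.Str.splitMax? l "# FILE: " 1).getD []) 1).getD ""))
  else
    match (if PySem.Str.startswith l "#/" then
             let c := PySem.Str.strip (PySem.Str.slice l (some 1) none)
             if PySem.Str.startswith c "/" then some c else none
           else none) with
    | some c => some c
    | none =>
      if PySem.Str.startswith l "# " then
        let c := PySem.Str.strip (PySem.Str.slice l (some 2) none)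
        if PySem.Str.startswith c "/" then some c else none
      else none

-- 'path = _extract_path(line); if path:' — truthy result (not None and not "")
def pvHeader (l : String) : Option String :=
  match pvExtractPath l with
  | some p => if p = "" then none else some p
  | none => none

-- '"\n".join(buffer).strip("\n")'
def pvFinish (buf : List String) : String :=
  PySem.Str.stripChars (PySem.Str.join "\n" buf) "\n"

-- A's loop: state = (files, current_path, buffer)
def pvLoopA : List String → PySem.Dict String String → Option String → List String →
    PySem.Dict String String
  | [], files, cur, buf =>
      match cur with
      | none => files
      | some c => files.insert c (pvFinish buf)
  | l :: ls, files, cur, buf =>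
      match pvHeader l with
      | some p =>
          match cur with
          | none => pvLoopA ls files (some p) []
          | some c => pvLoopA ls (files.insert c (pvFinish buf)) (some p) []
      | none =>
          match cur with
          | none => pvLoopA ls files none buf
          | some c =>
          if buf = [] ∧ PySem.Str.startswith l pvSep = true then pvLoopA ls files (some c) buf
          else pvLoopA ls files (some c) (buf ++ [l])

def parse_systemd_dump (dump : String) : List (String × String) :=
  (pvLoopA (PySem.Str.splitlines dump) PySem.Dict.empty none []).items

-- ===== PORT B =====

-- pass 1: 'segments.append((path, [])) / segments[-1][1].append(line)';
-- the still-growing last segment is carried separately since Lean lists are immutable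
def pvSegLoop : List String → List (String × List String) → Option (String × List String) →
    List (String × List String)
  | [], done, none => done
  | [], done, some s => done ++ [s]
  | l :: ls, done, cur =>
      match pvHeader l with
      | some p =>
          match cur with
          | none => pvSegLoop ls done (some (p, []))
          | some s => pvSegLoop ls (done ++ [s]) (some (p, []))
      | none =>
          match cur with
          | none => pvSegLoop ls done none
          | some s => pvSegLoop ls done (some (s.1, s.2 ++ [l]))

-- pass 2's while loop skipping leading separator lines
def pvDropSep : List String → List String
  | [] => []
  | l :: ls => if PySem.Str.startswith l pvSep = true then pvDropSep ls else l :: ls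

def parse_systemd_dump_alt (dump : String) : List (String × String) :=
  ((pvSegLoop (PySem.Str.splitlines dump) [] none).foldl
      (fun d s => d.insert s.1 (pvFinish (pvDropSep s.2))) PySem.Dict.empty).items

-- ===== PRECONDITION & SPEC =====
def Spec_parse_systemd_dump (dump : String) (out : List (String × String)) : Prop := out = parse_systemd_dump_alt dump
instance (dump : String) (out : List (String × String)) : Decidable (Spec_parse_systemd_dump dump out) := by unfold Spec_parse_systemd_dump; infer_instance

-- ===== CLAIM (what is proved, stated in full; the proofs are below) =====
def Claim_equal_parse_systemd_dump : Prop := ∀ (dump : String), Dom_parse_systemd_dump dump → Spec_parse_systemd_dump dump (parse_systemd_dump dump)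

-- ===== LEMMAS AND PROOFS =====

def pvIns (d : PySem.Dict String String) (s : String × List String) : PySem.Dict String String :=
  d.insert s.1 (pvFinish (pvDropSep s.2))

theorem pvSegLoop_done (ls : List String) : ∀ (done : List (String × List String))
    (cur : Option (String × List String)),
    pvSegLoop ls done cur = done ++ pvSegLoop ls [] cur := by
  induction ls with
  | nil =>
      intro done cur
      cases cur <;> simp only [pvSegLoop, List.append_nil, List.nil_append]
  | cons l ls ih =>
      intro done cur
      cases h : pvHeader l with
      | some p =>
          cases cur with
          | none => simp only [pvSegLoop, h]; exact ih done _
          | some s =>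
              simp only [pvSegLoop, h, List.nil_append]
              rw [ih (done ++ [s]), ih [s], List.append_assoc]
      | none =>
          cases cur with
          | none => simp only [pvSegLoop, h]; exact ih done none
          | some s => simp only [pvSegLoop, h]; exact ih done _

theorem pvDropSep_append_ne_nil : ∀ (b : List String) (l : String), pvDropSep b ≠ [] →
    pvDropSep (b ++ [l]) = pvDropSep b ++ [l]
  | [], _, h => absurd rfl h
  | x :: xs, l, h => by
      rw [List.cons_append]
      simp only [pvDropSep] at h ⊢
      by_cases hx : PySem.Str.startswith x pvSep = true
      · simp only [if_pos hx] at h ⊢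
        exact pvDropSep_append_ne_nil xs l h
      · rw [if_neg hx, if_neg hx, List.cons_append]

theorem pvDropSep_append_sep : ∀ (b : List String) (l : String), pvDropSep b = [] →
    PySem.Str.startswith l pvSep = true → pvDropSep (b ++ [l]) = []
  | [], l, _, hl => by
      simp only [List.nil_append, pvDropSep]
      rw [if_pos hl]
  | x :: xs, l, hb, hl => by
      rw [List.cons_append]
      simp only [pvDropSep] at hb ⊢
      by_cases hx : PySem.Str.startswith x pvSep = true
      · simp only [if_pos hx] at hb ⊢
        exact pvDropSep_append_sep xs l hb hl
      · rw [if_neg hx] at hb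
        exact absurd hb (by simp)

theorem pvDropSep_append_notsep : ∀ (b : List String) (l : String), pvDropSep b = [] →
    ¬ PySem.Str.startswith l pvSep = true → pvDropSep (b ++ [l]) = [l]
  | [], l, _, hl => by
      simp only [List.nil_append, pvDropSep]
      rw [if_neg hl]
  | x :: xs, l, hb, hl => by
      rw [List.cons_append]
      simp only [pvDropSep] at hb ⊢
      by_cases hx : PySem.Str.startswith x pvSep = true
      · simp only [if_pos hx] at hb ⊢
        exact pvDropSep_append_notsep xs l hb hl
      · rw [if_neg hx] at hb
        exact absurd hb (by simp)

theorem pvLoopA_seg (ls : List String) : ∀ (d : PySem.Dict String String) (p : String)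
    (buf b : List String), buf = pvDropSep b →
    pvLoopA ls d (some p) buf = (pvSegLoop ls [] (some (p, b))).foldl pvIns d := by
  induction ls with
  | nil =>
      intro d p buf b hb
      simp only [pvLoopA, pvSegLoop, List.nil_append, List.foldl_cons, List.foldl_nil, pvIns, hb]
  | cons l ls ih =>
      intro d p buf b hb
      cases h : pvHeader l with
      | some q =>
          simp only [pvLoopA, pvSegLoop, h, List.nil_append]
          rw [pvSegLoop_done ls [(p, b)] (some (q, [])), List.foldl_append,
            List.foldl_cons, List.foldl_nil]
          rw [ih (d.insert p (pvFinish buf)) q [] [] rfl, hb]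
          rfl
      | none =>
          simp only [pvLoopA, pvSegLoop, h]
          by_cases hc : buf = [] ∧ PySem.Str.startswith l pvSep = true
          · rw [if_pos hc]
            have hb0 : pvDropSep b = [] := by rw [← hb, hc.1]
            exact ih d p buf (b ++ [l])
              (by rw [pvDropSep_append_sep b l hb0 hc.2, hc.1])
          · rw [if_neg hc]
            apply ih d p (buf ++ [l]) (b ++ [l])
            by_cases hbuf : buf = []
            · have hl : ¬ PySem.Str.startswith l pvSep = true := fun hl => hc ⟨hbuf, hl⟩
              have hb0 : pvDropSep b = [] := by rw [← hb, hbuf]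
              rw [pvDropSep_append_notsep b l hb0 hl, hbuf, List.nil_append]
            · rw [pvDropSep_append_ne_nil b l (by rw [← hb]; exact hbuf), hb]

theorem pvLoopA_none (ls : List String) : ∀ (d : PySem.Dict String String),
    pvLoopA ls d none [] = (pvSegLoop ls [] none).foldl pvIns d := by
  induction ls with
  | nil => intro d; simp only [pvLoopA, pvSegLoop, List.foldl_nil]
  | cons l ls ih =>
      intro d
      cases h : pvHeader l with
      | some p =>
          simp only [pvLoopA, pvSegLoop, h]
          exact pvLoopA_seg ls d p [] [] rfl
      | none => simp only [pvLoopA, pvSegLoop, h]; exact ih d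

-- ===== VERDICT (by name: the statement is the Claim_ definition above) =====
theorem parse_systemd_dump_spec : Claim_equal_parse_systemd_dump := by
  intro dump _
  unfold Spec_parse_systemd_dump parse_systemd_dump parse_systemd_dump_alt
  rw [pvLoopA_none]
  rfl
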